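-- pv_equiv track=rewrite | github.com/vllm-project/vllm | vllm/distributed/eplb/eplb_policy/dynamic_ep_v2_policy.py | constraint_expert_local_exchange
-- ===== SOURCE A (Python) =====
-- def constraint_expert_local_exchange(current_expert_table,
--                                      global_deployment):
--     for layer_id in range(len(global_deployment)):
--         for card_id in range(len(global_deployment[layer_id])):
--             current_list = [
--                 int(x) for x in current_expert_table[layer_id][card_id]
--             ]
--             new_list = [
--                 int(x) for x in global_deployment[layer_id][card_id]
--             ]
--             num = len(new_list)
--
--             new_index = [-1] * num
--             new_result = [-1] * num
--             remaining_elements = []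
--
--             for i in range(num):
--                 flag = True
--                 for j in range(num):
--                     if new_list[i] == current_list[j] and new_index[
--                             j] == -1:
--                         new_index[j] = 0
--                         new_result[j] = current_list[j]
--                         flag = False
--                         break
--                 if flag:
--                     remaining_elements.append(new_list[i])
--
--             index = 0
--             for k in range(num):
--                 if new_result[k] == -1:
--                     new_result[k] = remaining_elements[index]
--                     index += 1
--
--             global_deployment[layer_id][card_id] = new_result
--
--     return global_deployment
-- ===== SOURCE B (Python) =====
-- def constraint_expert_local_exchange(current_expert_table,
--                                      global_deployment):
--     for layer_id, layer in enumerate(global_deployment):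
--         for card_id, card in enumerate(layer):
--             current = [int(x) for x in current_expert_table[layer_id][card_id]]
--             new = [int(x) for x in card]
--             pool = list(new)
--             kept = []
--             for v in current[:len(new)]:
--                 if v in pool:
--                     pool.remove(v)
--                     kept.append(v)
--                 else:
--                     kept.append(None)
--             it = iter(pool)
--             layer[card_id] = [v if v is not None else next(it) for v in kept]
--     return global_deployment
-- ===== Notes on version B (the rewrite author's own statement) =====
-- stated objective: simpler
-- what changed: Replaces A's first-fit matching (parallel new_index/new_result arrays with a quadratic inner scan-and-break over current positions, then a counted fill pass) by a consumable pool: one pass over the current experts keeps each one still present in the pool of newly demanded experts (removing it), and the surviving pool fills the holes in order; Pre_ excludes exactly the inputs on which A raises IndexError (a current row missing or shorter than the new row, or a -1 collision where A's -1 hole sentinel overruns remaining_elements).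
import Mathlib
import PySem

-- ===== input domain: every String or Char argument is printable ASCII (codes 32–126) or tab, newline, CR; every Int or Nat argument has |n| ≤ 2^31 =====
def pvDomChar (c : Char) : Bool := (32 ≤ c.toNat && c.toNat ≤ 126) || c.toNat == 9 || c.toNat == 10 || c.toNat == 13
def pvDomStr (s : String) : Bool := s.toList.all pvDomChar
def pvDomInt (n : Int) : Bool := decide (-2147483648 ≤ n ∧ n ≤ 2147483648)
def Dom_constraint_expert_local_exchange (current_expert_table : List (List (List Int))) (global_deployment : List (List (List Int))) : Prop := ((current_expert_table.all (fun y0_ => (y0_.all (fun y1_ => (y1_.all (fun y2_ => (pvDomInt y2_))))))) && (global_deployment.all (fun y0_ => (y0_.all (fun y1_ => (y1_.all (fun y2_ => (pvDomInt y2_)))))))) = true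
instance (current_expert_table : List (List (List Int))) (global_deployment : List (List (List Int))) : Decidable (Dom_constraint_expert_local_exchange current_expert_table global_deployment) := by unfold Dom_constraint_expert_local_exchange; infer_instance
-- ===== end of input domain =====

-- B replaces A's first-fit matching (new_index/new_result arrays with an inner scan-and-break
-- per new expert, then a counted fill pass) by a consumable pool of demanded experts: one pass
-- over the current experts keeps each one still in the pool and the surviving pool fills the
-- holes; objective: simpler. Both A and B mutate global_deployment in place in Python; the
-- equivalence proved here is about the returned value.


-- ===== PORT A =====

-- inner 'for j in range(num): if new_list[i] == current_list[j] and new_index[j] == -1: ...; break'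
def pvAFind (v : Int) (cur newIndex newResult : List Int) (j num : Nat) :
    List Int × List Int × Bool :=
  if _h : j < num then
    if v == PySem.List.pyGetD cur (j : Int) 0 &&
        PySem.List.pyGetD newIndex (j : Int) 0 == -1 then
      (newIndex.set j 0, newResult.set j (PySem.List.pyGetD cur (j : Int) 0), false)
    else
      pvAFind v cur newIndex newResult (j + 1) num
  else
    (newIndex, newResult, true)
  termination_by num - j

-- one iteration of A's outer 'for i in range(num)' over state (new_index, new_result, remaining)
def pvAStep (cur : List Int) (num : Nat) (st : List Int × List Int × List Int) (v : Int) :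
    List Int × List Int × List Int :=
  match pvAFind v cur st.1 st.2.1 0 num with
  | (ni, nr, flag) => if flag then (ni, nr, st.2.2 ++ [v]) else (ni, nr, st.2.2)

-- 'for k in range(num): if new_result[k] == -1: new_result[k] = remaining[index]; index += 1'
-- (the running index into remaining is modelled by consuming remaining front-to-back)
def pvAFill (res rem : List Int) : List Int :=
  match res with
  | [] => []
  | r :: rs => if r == -1 then rem.headD 0 :: pvAFill rs rem.tail else r :: pvAFill rs rem

-- A's body for one (layer, card): current_list = cur, new_list = new ('int(x)' is the identity on Int)
def pvACard (cur new : List Int) : List Int :=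
  let num := new.length
  let st := new.foldl (pvAStep cur num)
      (List.replicate num (-1), List.replicate num (-1), ([] : List Int))
  pvAFill st.2.1 st.2.2

def constraint_expert_local_exchange (current_expert_table : List (List (List Int)))
    (global_deployment : List (List (List Int))) : List (List (List Int)) :=
  (List.range global_deployment.length).foldl (fun gd li =>
    (List.range (gd.getD li []).length).foldl (fun gd ci =>
      gd.set li ((gd.getD li []).set ci
        (pvACard ((current_expert_table.getD li []).getD ci [])
          ((gd.getD li []).getD ci [])))) gd) global_deployment

-- ===== PORT B =====

-- 'for v in current[:len(new)]: if v in pool: pool.remove(v); kept.append(v) else: kept.append(None)'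
-- (pool.remove of a present element is erase-first-occurrence)
def pvBStep (st : List Int × List (Option Int)) (v : Int) : List Int × List (Option Int) :=
  if v ∈ st.1 then (st.1.erase v, st.2 ++ [some v]) else (st.1, st.2 ++ [none])

-- '[v if v is not None else next(it) for v in kept]' (next(it) consumes pool front-to-back)
def pvBFill (kept : List (Option Int)) (rem : List Int) : List Int :=
  match kept with
  | [] => []
  | some v :: ks => v :: pvBFill ks rem
  | none :: ks => rem.headD 0 :: pvBFill ks rem.tail

-- B's body for one (layer, card); current[:len(new)] is PySem.List.slice
def pvBCard (cur new : List Int) : List Int :=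
  let st := (PySem.List.slice cur none (some (new.length : Int))).foldl pvBStep (new, [])
  pvBFill st.2 st.1

def constraint_expert_local_exchange_alt (current_expert_table : List (List (List Int)))
    (global_deployment : List (List (List Int))) : List (List (List Int)) :=
  (PySem.List.enumerate global_deployment).map (fun p =>
    (PySem.List.enumerate p.2).map (fun q =>
      pvBCard ((current_expert_table.getD p.1.toNat []).getD q.1.toNat []) q.2))

-- ===== PRECONDITION & SPEC =====

-- Pre_ excludes exactly the inputs on which A raises IndexError: a card whose current list is
-- missing or shorter than its new list (current_list[j] out of range), and a card whose new list
-- and used prefix of the current list both contain -1, where A's -1 hole sentinel makes the fill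
-- loop run past the end of remaining_elements.
def Pre_constraint_expert_local_exchange (current_expert_table : List (List (List Int))) (global_deployment : List (List (List Int))) : Prop :=
  ∀ li < global_deployment.length, ∀ ci < (global_deployment.getD li []).length,
    li < current_expert_table.length ∧ ci < (current_expert_table.getD li []).length ∧
    ((global_deployment.getD li []).getD ci []).length ≤ ((current_expert_table.getD li []).getD ci []).length ∧
    ¬((-1 : Int) ∈ (global_deployment.getD li []).getD ci [] ∧
      (-1 : Int) ∈ ((current_expert_table.getD li []).getD ci []).take ((global_deployment.getD li []).getD ci []).length)

instance (current_expert_table : List (List (List Int))) (global_deployment : List (List (List Int))) : Decidable (Pre_constraint_expert_local_exchange current_expert_table global_deployment) := by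
  unfold Pre_constraint_expert_local_exchange; infer_instance

def pvWitness_constraint_expert_local_exchange : List (List (List Int)) × List (List (List Int)) :=
  ([[[1, 2, 7], [3, 3]]], [[[2, 5, 1], [4, 3]]])

def Spec_constraint_expert_local_exchange (current_expert_table : List (List (List Int))) (global_deployment : List (List (List Int))) (out : List (List (List Int))) : Prop := out = constraint_expert_local_exchange_alt current_expert_table global_deployment
instance (current_expert_table : List (List (List Int))) (global_deployment : List (List (List Int))) (out : List (List (List Int))) : Decidable (Spec_constraint_expert_local_exchange current_expert_table global_deployment out) := by unfold Spec_constraint_expert_local_exchange; infer_instance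

-- ===== CLAIM (what is proved, stated in full; the proofs are below) =====
def Claim_equal_constraint_expert_local_exchange : Prop := ∀ (current_expert_table : List (List (List Int))) (global_deployment : List (List (List Int))), Dom_constraint_expert_local_exchange current_expert_table global_deployment → Pre_constraint_expert_local_exchange current_expert_table global_deployment → Spec_constraint_expert_local_exchange current_expert_table global_deployment (constraint_expert_local_exchange current_expert_table global_deployment)

-- ===== LEMMAS AND PROOFS =====

def pvSub (p : List Int) (b : Int → Nat) : List Int :=
  match p with
  | [] => []
  | v :: t => if 0 < b v then pvSub t (fun w => if w = v then b v - 1 else b w) else v :: pvSub t b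

def pvPoolStep (pl : List Int) (v : Int) : List Int := if v ∈ pl then pl.erase v else pl

def pvKeptOf (s pl : List Int) : List (Option Int) :=
  match s with
  | [] => []
  | v :: t => (if v ∈ pl then some v else none) :: pvKeptOf t (pvPoolStep pl v)

lemma pvSub_congr (p : List Int) : ∀ (b₁ b₂ : Int → Nat), (∀ w ∈ p, b₁ w = b₂ w) →
    pvSub p b₁ = pvSub p b₂ := by
  induction p with
  | nil => intro _ _ _; rfl
  | cons v t ih =>
    intro b₁ b₂ h
    have hv := h v (List.mem_cons_self ..)
    simp only [pvSub, hv]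
    split_ifs with h0
    · exact ih _ _ (fun w hw => by
        by_cases hwv : w = v
        · simp [hwv]
        · simp [hwv, h w (List.mem_cons_of_mem _ hw)])
    · rw [ih _ _ (fun w hw => h w (List.mem_cons_of_mem _ hw))]

lemma pvSub_zero (p : List Int) : pvSub p (fun _ => 0) = p := by
  induction p with
  | nil => rfl
  | cons v t ih => simp [pvSub, ih]

lemma pvSub_append (p : List Int) : ∀ (b : Int → Nat) (v : Int),
    pvSub (p ++ [v]) b = pvSub p b ++ (if p.count v < b v then [] else [v]) := by
  induction p with
  | nil =>
    intro b v
    by_cases h : 0 < b v <;> simp [pvSub, h]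
  | cons w t ih =>
    intro b v
    simp only [List.cons_append, pvSub]
    by_cases h0 : 0 < b w
    · rw [if_pos h0, if_pos h0, ih]
      congr 1
      by_cases hvw : v = w
      · subst hvw
        rw [if_pos rfl, List.count_cons_self]
        split_ifs <;> first | rfl | omega
      · rw [if_neg hvw]
        have hb : (w == v) = false := by simp [Ne.symm hvw]
        simp [List.count_cons, hb]
    · rw [if_neg h0, if_neg h0, ih, List.cons_append]
      congr 2
      by_cases hvw : v = w
      · subst hvw
        rw [List.count_cons_self]
        have hb : b v = 0 := by omega
        simp [hb]
      · have hb : (w == v) = false := by simp [Ne.symm hvw]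
        simp [List.count_cons, hb]

lemma pvPoolStep_cons_of_ne (w v : Int) (t : List Int) (h : w ≠ v) :
    pvPoolStep (w :: t) v = w :: pvPoolStep t v := by
  have he : (w :: t).erase v = w :: t.erase v := List.erase_cons_tail (by simpa using h)
  unfold pvPoolStep
  by_cases hv : v ∈ t
  · rw [if_pos (List.mem_cons_of_mem _ hv), if_pos hv, he]
  · rw [if_neg (by simp [hv, Ne.symm h]), if_neg hv]

lemma pvPoolStep_sub (v : Int) : ∀ (pl : List Int) (b : Int → Nat),
    pvSub (pvPoolStep pl v) b = pvSub pl (fun w => if w = v then b w + 1 else b w) := by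
  intro pl
  induction pl with
  | nil => intro b; rfl
  | cons w t ih =>
    intro b
    by_cases hwv : w = v
    · subst hwv
      have h1 : pvPoolStep (w :: t) w = t := by simp [pvPoolStep]
      rw [h1]
      simp only [pvSub, Nat.succ_pos, if_true]
      apply pvSub_congr
      intro u hu
      by_cases huv : u = w <;> simp [huv]
    · rw [pvPoolStep_cons_of_ne _ _ _ hwv]
      simp only [pvSub, ih]
      rw [if_neg hwv]
      by_cases h0 : 0 < b w
      · rw [if_pos h0, if_pos h0]
        apply pvSub_congr
        intro u hu
        by_cases huv : u = v <;> by_cases huw : u = w <;> simp_all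
      · rw [if_neg h0, if_neg h0]

lemma pvPool_fold (s : List Int) : ∀ (pl : List Int),
    s.foldl pvPoolStep pl = pvSub pl (fun v => s.count v) := by
  induction s with
  | nil => intro pl; simp [pvSub_zero]
  | cons v t ih =>
    intro pl
    simp only [List.foldl_cons, ih, pvPoolStep_sub]
    apply pvSub_congr
    intro w hw
    by_cases hwv : w = v
    · simp [hwv]
    · simp [Ne.symm hwv, hwv]

lemma pvB_fold (s : List Int) : ∀ (pl : List Int) (acc : List (Option Int)),
    s.foldl pvBStep (pl, acc) = (s.foldl pvPoolStep pl, acc ++ pvKeptOf s pl) := by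
  induction s with
  | nil => intro pl acc; simp [pvKeptOf]
  | cons v t ih =>
    intro pl acc
    simp only [List.foldl_cons, pvKeptOf]
    by_cases hv : v ∈ pl
    · have h1 : pvBStep (pl, acc) v = (pl.erase v, acc ++ [some v]) := by simp [pvBStep, hv]
      have h2 : pvPoolStep pl v = pl.erase v := by simp [pvPoolStep, hv]
      rw [h1, ih, h2]
      simp [hv]
    · have h1 : pvBStep (pl, acc) v = (pl, acc ++ [none]) := by simp [pvBStep, hv]
      have h2 : pvPoolStep pl v = pl := by simp [pvPoolStep, hv]
      rw [h1, ih, h2]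
      simp [hv]

lemma pvKeptOf_spec (s : List Int) : ∀ (pl : List Int),
    pvKeptOf s pl = (List.range s.length).map (fun j =>
      if (s.take j).count (s.getD j 0) < pl.count (s.getD j 0) then some (s.getD j 0) else none) := by
  induction s with
  | nil => intro pl; rfl
  | cons v t ih =>
    intro pl
    simp only [pvKeptOf, List.length_cons, List.range_succ_eq_map, List.map_cons, List.map_map]
    refine List.cons_eq_cons.mpr ⟨?_, ?_⟩
    · simp only [List.take_zero, List.count_nil, List.getD_cons_zero, List.count_pos_iff]
    · rw [ih (pvPoolStep pl v)]
      apply List.map_congr_left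
      intro j hj
      rw [List.mem_range] at hj
      simp only [Function.comp, Nat.succ_eq_add_one, List.getD_cons_succ, List.take_succ_cons]
      set u := t.getD j 0 with hu
      have hcnt : (v :: t.take j).count u = (t.take j).count u + if u = v then 1 else 0 := by
        by_cases huv : u = v
        · simp [huv, List.count_cons_self]
        · have hb : (v == u) = false := beq_eq_false_iff_ne.mpr (fun h => huv h.symm)
          simp only [List.count_cons, hb]
          rw [if_neg huv]
          simp
      rw [hcnt]
      have hpool : (pvPoolStep pl v).count u = pl.count u - (if u = v ∧ v ∈ pl then 1 else 0) := by
        unfold pvPoolStep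
        by_cases hv : v ∈ pl
        · rw [if_pos hv, List.count_erase]
          by_cases huv : u = v
          · subst huv; simp [hv]
          · have h3 : ¬ (u = v ∧ v ∈ pl) := fun h => huv h.1
            rw [if_neg h3]
            have hb : (v == u) = false := beq_eq_false_iff_ne.mpr (fun h => huv h.symm)
            rw [hb]
            simp
        · rw [if_neg hv]
          have h3 : ¬ (u = v ∧ v ∈ pl) := fun h => hv h.2
          simp [h3]
      rw [hpool]
      by_cases huv : u = v
      · subst huv
        have h1 : (if u = u then (1:Nat) else 0) = 1 := if_pos rfl
        by_cases hv : u ∈ pl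
        · have h2 : (if u = u ∧ u ∈ pl then (1:Nat) else 0) = 1 := if_pos ⟨rfl, hv⟩
          rw [h1, h2]
          have hc : 0 < pl.count u := List.count_pos_iff.mpr hv
          split_ifs <;> first | rfl | omega
        · have h2 : (if u = u ∧ u ∈ pl then (1:Nat) else 0) = 0 := if_neg (fun h => hv h.2)
          rw [h1, h2]
          have hc : pl.count u = 0 := List.count_eq_zero.mpr hv
          split_ifs <;> first | rfl | omega
      · have h1 : (if u = v then (1:Nat) else 0) = 0 := if_neg huv
        have h2 : (if u = v ∧ v ∈ pl then (1:Nat) else 0) = 0 := if_neg (fun h => huv h.1)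
        rw [h1, h2]
        simp

lemma pvFill_eq (ks : List (Option Int)) : ∀ (rem : List Int),
    (∀ o ∈ ks, o ≠ some (-1)) →
    pvAFill (ks.map (fun o => o.getD (-1))) rem = pvBFill ks rem := by
  induction ks with
  | nil => intro rem _; rfl
  | cons o ks ih =>
    intro rem h
    match o with
    | none =>
      simp only [List.map_cons, Option.getD_none, pvAFill, pvBFill]
      rw [if_pos (by decide)]
      rw [ih _ (fun o ho => h o (List.mem_cons_of_mem _ ho))]
    | some v =>
      have hv : v ≠ -1 := by
        intro hv; exact h (some v) (List.mem_cons_self ..) (by rw [hv])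
      simp only [List.map_cons, Option.getD_some, pvAFill, pvBFill]
      rw [if_neg (by simpa using hv)]
      rw [ih _ (fun o ho => h o (List.mem_cons_of_mem _ ho))]

def pvKeep (cur p : List Int) (j : Nat) : Bool :=
  (cur.take j).count (cur.getD j 0) < p.count (cur.getD j 0)

def pvNI (cur p : List Int) (num : Nat) : List Int :=
  (List.range num).map (fun j => if pvKeep cur p j then 0 else -1)

def pvNR (cur p : List Int) (num : Nat) : List Int :=
  (List.range num).map (fun j => if pvKeep cur p j then cur.getD j 0 else -1)

def pvKS (cur p : List Int) (num : Nat) : List (Option Int) :=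
  (List.range num).map (fun j => if pvKeep cur p j then some (cur.getD j 0) else none)

lemma pvCountTakeLt (cur : List Int) (v : Int) (i k : Nat) (hik : i < k) (hk : k ≤ cur.length)
    (hv : cur.getD i 0 = v) : (cur.take i).count v < (cur.take k).count v := by
  have hi : i < cur.length := lt_of_lt_of_le hik hk
  have h1 : cur.take (i+1) = cur.take i ++ [cur[i]] := by
    rw [List.take_add_one, List.getElem?_eq_getElem hi]
    rfl
  have h2 : (cur.take (i+1)).count v = (cur.take i).count v + 1 := by
    rw [h1, List.count_append]
    have : cur[i] = v := by rwa [List.getD_eq_getElem _ _ hi] at hv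
    simp [this]
  have h3 : (cur.take (i+1)).count v ≤ (cur.take k).count v := by
    have hsub : (cur.take (i+1)).Sublist (cur.take k) := by
      have : (cur.take k).take (i+1) = cur.take (i+1) := by
        rw [List.take_take, min_eq_left (by omega)]
      rw [← this]
      exact List.take_sublist _ _
    exact hsub.count_le v
  omega

lemma pvCountAppendSingle (p : List Int) (v u : Int) :
    (p ++ [v]).count u = p.count u + (if u = v then 1 else 0) := by
  rw [List.count_append]
  by_cases huv : u = v
  · simp [huv]
  · have h0 : ([v] : List Int).count u = 0 := List.count_eq_zero.mpr (by simp [huv])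
    rw [h0, if_neg huv]

lemma pvKeep_append_of_le (cur p : List Int) (v : Int) (num : Nat) (hnum : num ≤ cur.length)
    (h : (cur.take num).count v ≤ p.count v) (i : Nat) (hi : i < num) :
    pvKeep cur (p ++ [v]) i = pvKeep cur p i := by
  unfold pvKeep
  rw [pvCountAppendSingle]
  by_cases huv : cur.getD i 0 = v
  · rw [huv, if_pos rfl]
    have hlt : (cur.take i).count v < (cur.take num).count v :=
      pvCountTakeLt cur v i num hi hnum huv
    simp only [decide_eq_decide]
    omega
  · rw [if_neg huv, add_zero]

lemma pvKeep_append_match (cur p : List Int) (v : Int) (num j : Nat) (hnum : num ≤ cur.length)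
    (hj : j < num) (hv : cur.getD j 0 = v) (heq : (cur.take j).count v = p.count v)
    (i : Nat) (hi : i < num) :
    pvKeep cur (p ++ [v]) i = if i = j then true else pvKeep cur p i := by
  by_cases hij : i = j
  · subst hij
    rw [if_pos rfl]
    unfold pvKeep
    rw [hv, pvCountAppendSingle, if_pos rfl]
    simp only [decide_eq_true_eq]
    omega
  · rw [if_neg hij]
    unfold pvKeep
    rw [pvCountAppendSingle]
    by_cases huv : cur.getD i 0 = v
    · rw [huv, if_pos rfl]
      rcases Nat.lt_or_ge i j with hlt | hge
      · have h1 : (cur.take i).count v < (cur.take j).count v :=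
          pvCountTakeLt cur v i j hlt (le_trans (Nat.le_of_lt hj) hnum) huv
        simp only [decide_eq_decide]
        omega
      · have hji : j < i := by omega
        have h1 : (cur.take j).count v < (cur.take i).count v :=
          pvCountTakeLt cur v j i hji (le_trans (Nat.le_of_lt hi) hnum) hv
        simp only [decide_eq_decide]
        omega
    · rw [if_neg huv, add_zero]

lemma pvMapRangeSet {α : Type} (n j : Nat) (f : Nat → α) (x : α) :
    ((List.range n).map f).set j x = (List.range n).map (fun i => if i = j then x else f i) := by
  apply List.ext_getElem
  · simp
  · intro i h1 h2
    simp only [List.getElem_set, List.getElem_map, List.getElem_range]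
    split_ifs with hx hy hy <;> first | rfl | omega

lemma pvNI_append_of_le (cur p : List Int) (v : Int) (num : Nat) (hnum : num ≤ cur.length)
    (h : (cur.take num).count v ≤ p.count v) :
    pvNI cur (p ++ [v]) num = pvNI cur p num := by
  unfold pvNI
  apply List.map_congr_left
  intro i hi
  rw [List.mem_range] at hi
  rw [pvKeep_append_of_le cur p v num hnum h i hi]

lemma pvNR_append_of_le (cur p : List Int) (v : Int) (num : Nat) (hnum : num ≤ cur.length)
    (h : (cur.take num).count v ≤ p.count v) :
    pvNR cur (p ++ [v]) num = pvNR cur p num := by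
  unfold pvNR
  apply List.map_congr_left
  intro i hi
  rw [List.mem_range] at hi
  rw [pvKeep_append_of_le cur p v num hnum h i hi]

lemma pvNI_append_match (cur p : List Int) (v : Int) (num j : Nat) (hnum : num ≤ cur.length)
    (hj : j < num) (hv : cur.getD j 0 = v) (heq : (cur.take j).count v = p.count v) :
    pvNI cur (p ++ [v]) num = (pvNI cur p num).set j 0 := by
  unfold pvNI
  rw [pvMapRangeSet]
  apply List.map_congr_left
  intro i hi
  rw [List.mem_range] at hi
  rw [pvKeep_append_match cur p v num j hnum hj hv heq i hi]
  by_cases hij : i = j <;> simp [hij]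

lemma pvNR_append_match (cur p : List Int) (v : Int) (num j : Nat) (hnum : num ≤ cur.length)
    (hj : j < num) (hv : cur.getD j 0 = v) (heq : (cur.take j).count v = p.count v) :
    pvNR cur (p ++ [v]) num = (pvNR cur p num).set j (cur.getD j 0) := by
  unfold pvNR
  rw [pvMapRangeSet]
  apply List.map_congr_left
  intro i hi
  rw [List.mem_range] at hi
  rw [pvKeep_append_match cur p v num j hnum hj hv heq i hi]
  by_cases hij : i = j <;> simp [hij]

lemma pvAFind_spec (cur p : List Int) (num : Nat) (hnum : num ≤ cur.length) (v : Int) :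
    ∀ (k j : Nat), num - j = k → j ≤ num → (cur.take j).count v ≤ p.count v →
    pvAFind v cur (pvNI cur p num) (pvNR cur p num) j num =
      (pvNI cur (p ++ [v]) num, pvNR cur (p ++ [v]) num,
        decide ((cur.take num).count v ≤ p.count v)) := by
  intro k
  induction k with
  | zero =>
    intro j hk hj hinv
    have hjn : j = num := by omega
    subst hjn
    rw [pvAFind, dif_neg (by omega)]
    rw [pvNI_append_of_le cur p v _ hnum hinv, pvNR_append_of_le cur p v _ hnum hinv]
    rw [decide_eq_true hinv]
  | succ k ih =>
    intro j hk hj hinv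
    have hjlt : j < num := by omega
    rw [pvAFind, dif_pos hjlt]
    have hcur : PySem.List.pyGetD cur (j : Int) 0 = cur.getD j 0 :=
      PySem.List.pyGetD_natCast cur j 0
    have hni : PySem.List.pyGetD (pvNI cur p num) (j : Int) 0
        = if pvKeep cur p j then 0 else -1 := by
      rw [PySem.List.pyGetD_natCast]
      exact PySem.List.getD_map_range _ _ _ _ hjlt
    by_cases hmatch : cur.getD j 0 = v ∧ pvKeep cur p j = false
    · obtain ⟨hv, hkeep⟩ := hmatch
      have hcond : (v == PySem.List.pyGetD cur (j : Int) 0 &&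
          PySem.List.pyGetD (pvNI cur p num) (j : Int) 0 == -1) = true := by
        rw [hcur, hni, hv, hkeep]
        simp
      rw [if_pos hcond]
      have heq : (cur.take j).count v = p.count v := by
        unfold pvKeep at hkeep
        rw [hv] at hkeep
        simp only [decide_eq_false_iff_not, not_lt] at hkeep
        omega
      have hflag : ¬ ((cur.take num).count v ≤ p.count v) := by
        have := pvCountTakeLt cur v j num hjlt hnum hv
        omega
      rw [decide_eq_false hflag]
      rw [pvNI_append_match cur p v num j hnum hjlt hv heq,
          pvNR_append_match cur p v num j hnum hjlt hv heq, hcur]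
    · have hcond : (v == PySem.List.pyGetD cur (j : Int) 0 &&
          PySem.List.pyGetD (pvNI cur p num) (j : Int) 0 == -1) = false := by
        rw [hcur, hni]
        rcases Bool.eq_false_or_eq_true (pvKeep cur p j) with hk1 | hk1
        · rw [hk1]
          simp
        · rw [hk1]
          have hne : (v == cur.getD j 0) = false :=
            beq_eq_false_iff_ne.mpr (fun h => hmatch ⟨h.symm, hk1⟩)
          rw [if_neg Bool.false_ne_true]
          simp only [hne, Bool.false_and]
      rw [if_neg (by rw [hcond]; exact Bool.false_ne_true)]
      have hstep : (cur.take (j+1)).count v ≤ p.count v := by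
        have h1 : cur.take (j+1) = cur.take j ++ [cur[j]'(by omega)] := by
          rw [List.take_add_one, List.getElem?_eq_getElem (by omega : j < cur.length)]
          rfl
        rw [h1, List.count_append]
        by_cases hv : cur.getD j 0 = v
        · have hkeep : pvKeep cur p j = true := by
            rcases Bool.eq_false_or_eq_true (pvKeep cur p j) with hk1 | hk1
            · exact hk1
            · exact absurd ⟨hv, hk1⟩ hmatch
          unfold pvKeep at hkeep
          rw [hv] at hkeep
          simp only [decide_eq_true_eq] at hkeep
          have : cur[j]'(by omega) = v := by
            rwa [List.getD_eq_getElem _ _ (by omega : j < cur.length)] at hv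
          simp [this]
          omega
        · have : cur[j]'(by omega) ≠ v := by
            rwa [List.getD_eq_getElem _ _ (by omega : j < cur.length)] at hv
          have h0 : ([cur[j]'(by omega)] : List Int).count v = 0 :=
            List.count_eq_zero.mpr (fun hm => this (List.mem_singleton.mp hm).symm)
          omega
      exact ih (j+1) (by omega) (by omega) hstep

lemma pvAStep_spec (cur p : List Int) (num : Nat) (hnum : num ≤ cur.length) (v : Int) :
    pvAStep cur num (pvNI cur p num, pvNR cur p num,
        pvSub p (fun w => (cur.take num).count w)) v =
      (pvNI cur (p ++ [v]) num, pvNR cur (p ++ [v]) num,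
        pvSub (p ++ [v]) (fun w => (cur.take num).count w)) := by
  unfold pvAStep
  rw [pvAFind_spec cur p num hnum v (num - 0) 0 rfl (by omega) (by simp)]
  rw [pvSub_append]
  by_cases hflag : (cur.take num).count v ≤ p.count v
  · rw [decide_eq_true hflag]
    rw [if_neg (by omega)]
    simp
  · rw [decide_eq_false hflag]
    rw [if_pos (by omega)]
    simp

lemma pvAFold_spec (cur : List Int) (num : Nat) (hnum : num ≤ cur.length) :
    ∀ (q p : List Int),
    q.foldl (pvAStep cur num) (pvNI cur p num, pvNR cur p num,
        pvSub p (fun w => (cur.take num).count w)) =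
      (pvNI cur (p ++ q) num, pvNR cur (p ++ q) num,
        pvSub (p ++ q) (fun w => (cur.take num).count w)) := by
  intro q
  induction q with
  | nil => intro p; simp
  | cons v t ih =>
    intro p
    rw [List.foldl_cons, pvAStep_spec cur p num hnum v, ih (p ++ [v])]
    simp

lemma pvNR_eq_map (cur p : List Int) (num : Nat) :
    pvNR cur p num = (pvKS cur p num).map (fun o => o.getD (-1)) := by
  unfold pvNR pvKS
  rw [List.map_map]
  apply List.map_congr_left
  intro i _
  by_cases h : pvKeep cur p i <;> simp [h]

lemma pvGetD_take (cur : List Int) (num j : Nat) (hj : j < num) (hnum : num ≤ cur.length) :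
    (cur.take num).getD j 0 = cur.getD j 0 := by
  have h1 : j < (cur.take num).length := by rw [List.length_take]; omega
  have h2 : j < cur.length := by omega
  rw [List.getD_eq_getElem _ _ h1, List.getD_eq_getElem _ _ h2, List.getElem_take]

lemma pvCard_eq (cur new : List Int) (hlen : new.length ≤ cur.length)
    (hcol : ¬((-1 : Int) ∈ new ∧ (-1 : Int) ∈ cur.take new.length)) :
    pvACard cur new = pvBCard cur new := by
  have hni0 : pvNI cur [] new.length = List.replicate new.length (-1) := by
    unfold pvNI
    rw [List.map_congr_left (fun j _ => by simp [pvKeep] : ∀ j ∈ List.range new.length,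
      (if pvKeep cur [] j then (0:Int) else -1) = -1)]
    rw [List.map_const', List.length_range]
  have hnr0 : pvNR cur [] new.length = List.replicate new.length (-1) := by
    unfold pvNR
    rw [List.map_congr_left (fun j _ => by simp [pvKeep] : ∀ j ∈ List.range new.length,
      (if pvKeep cur [] j then cur.getD j 0 else -1) = -1)]
    rw [List.map_const', List.length_range]
  have hA : pvACard cur new
      = pvAFill (pvNR cur new new.length) (pvSub new (fun w => (cur.take new.length).count w)) := by
    unfold pvACard
    dsimp only
    have hinit : (List.replicate new.length (-1:Int), List.replicate new.length (-1:Int), ([]:List Int))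
        = (pvNI cur [] new.length, pvNR cur [] new.length,
            pvSub ([] : List Int) (fun w => (cur.take new.length).count w)) := by
      rw [hni0, hnr0]; rfl
    rw [hinit, pvAFold_spec cur new.length hlen new []]
    simp
  have hB : pvBCard cur new
      = pvBFill (pvKS cur new new.length) (pvSub new (fun w => (cur.take new.length).count w)) := by
    unfold pvBCard
    rw [PySem.List.slice_to_natCast, pvB_fold, pvPool_fold, pvKeptOf_spec]
    dsimp only
    rw [List.nil_append]
    have hlen2 : (cur.take new.length).length = new.length := by
      rw [List.length_take]; omega
    congr 1
    rw [hlen2]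
    unfold pvKS
    apply List.map_congr_left
    intro j hj
    rw [List.mem_range] at hj
    rw [pvGetD_take cur new.length j hj hlen]
    rw [List.take_take, min_eq_left (by omega)]
    unfold pvKeep
    simp
  rw [hA, hB, pvNR_eq_map]
  apply pvFill_eq
  intro o ho
  unfold pvKS at ho
  rw [List.mem_map] at ho
  obtain ⟨j, hj, rfl⟩ := ho
  rw [List.mem_range] at hj
  by_cases hk : pvKeep cur new j
  · rw [if_pos hk]
    intro hsome
    have hu : cur.getD j 0 = -1 := by injection hsome
    unfold pvKeep at hk
    rw [hu] at hk
    simp only [decide_eq_true_eq] at hk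
    have hmemnew : (-1 : Int) ∈ new := by
      have : 0 < new.count (-1 : Int) := by omega
      exact List.count_pos_iff.mp this
    have hmemcur : (-1 : Int) ∈ cur.take new.length := by
      have h1 : j < (cur.take new.length).length := by rw [List.length_take]; omega
      have h2 : (cur.take new.length)[j] = -1 := by
        rw [List.getElem_take]
        rw [← List.getD_eq_getElem _ _ (by omega : j < cur.length)]
        exact hu
      rw [← h2]
      exact List.getElem_mem h1
    exact hcol ⟨hmemnew, hmemcur⟩
  · rw [if_neg (by simpa using hk)]
    simp

def pvRowMap (g : Nat → List Int → List Int) (row : List (List Int)) : List (List Int) :=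
  (List.range row.length).map (fun ci => g ci (row.getD ci []))

def pvMapBelow (n : Nat) (g : Nat → List Int → List Int) (row : List (List Int)) : List (List Int) :=
  (List.range row.length).map (fun i => if i < n then g i (row.getD i []) else row.getD i [])

lemma pvRowId {α : Type} (row : List α) (d : α) :
    (List.range row.length).map (fun i => row.getD i d) = row := by
  apply List.ext_getElem
  · simp
  · intro i h1 h2
    simp only [List.getElem_map, List.getElem_range]
    rw [List.getD_eq_getElem _ _ h2]

lemma pvInnerFold (g : Nat → List Int → List Int) (li : Nat) :
    ∀ (n : Nat) (gd : List (List (List Int))), li < gd.length → n ≤ (gd.getD li []).length →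
    (List.range n).foldl (fun r ci =>
        r.set li ((r.getD li []).set ci (g ci ((r.getD li []).getD ci [])))) gd
      = gd.set li (pvMapBelow n g (gd.getD li [])) := by
  intro n
  induction n with
  | zero =>
    intro gd hli _
    have : pvMapBelow 0 g (gd.getD li []) = gd.getD li [] := by
      unfold pvMapBelow
      rw [List.map_congr_left (fun i _ => by simp : ∀ i ∈ List.range (gd.getD li []).length,
        (if i < 0 then g i ((gd.getD li []).getD i []) else (gd.getD li []).getD i [])
          = (gd.getD li []).getD i [])]
      exact pvRowId _ _
    rw [List.range_zero, List.foldl_nil, this]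
    rw [List.getD_eq_getElem _ _ hli, List.set_getElem_self]
  | succ n ih =>
    intro gd hli hn
    rw [List.range_succ, List.foldl_append, ih gd hli (by omega), List.foldl_cons, List.foldl_nil]
    have hget : ((gd.set li (pvMapBelow n g (gd.getD li []))).getD li []) = pvMapBelow n g (gd.getD li []) := by
      rw [List.getD_eq_getElem _ _ (by simpa using hli), List.getElem_set_self]
    rw [hget]
    have hn' : n < (gd.getD li []).length := by omega
    have hrow_n : (pvMapBelow n g (gd.getD li [])).getD n [] = (gd.getD li []).getD n [] := by
      unfold pvMapBelow
      rw [PySem.List.getD_map_range _ _ _ _ hn']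
      rw [if_neg (by omega)]
    rw [hrow_n, List.set_set]
    congr 1
    unfold pvMapBelow
    rw [pvMapRangeSet]
    apply List.map_congr_left
    intro i hi
    rw [List.mem_range] at hi
    by_cases hin : i = n
    · subst hin
      rw [if_pos rfl, if_pos (by omega)]
    · rw [if_neg hin]
      by_cases h2 : i < n
      · rw [if_pos h2, if_pos (by omega)]
      · rw [if_neg h2, if_neg (by omega)]

lemma pvOuterFold (F : Nat → Nat → List Int → List Int) :
    ∀ (m : Nat) (gd : List (List (List Int))), m ≤ gd.length →
    (List.range m).foldl (fun r li =>
      (List.range (r.getD li []).length).foldl (fun r ci =>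
        r.set li ((r.getD li []).set ci (F li ci ((r.getD li []).getD ci [])))) r) gd
      = (List.range gd.length).map (fun li =>
          if li < m then pvRowMap (F li) (gd.getD li []) else gd.getD li []) := by
  intro m
  induction m with
  | zero =>
    intro gd _
    rw [List.range_zero, List.foldl_nil]
    rw [List.map_congr_left (fun i _ => by simp : ∀ i ∈ List.range gd.length,
      (if i < 0 then pvRowMap (F i) (gd.getD i []) else gd.getD i []) = gd.getD i [])]
    exact (pvRowId gd _).symm
  | succ m ih =>
    intro gd hm
    rw [List.range_succ, List.foldl_append, ih gd (by omega), List.foldl_cons, List.foldl_nil]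
    have hmlt : m < gd.length := by omega
    have hlen : ((List.range gd.length).map (fun li =>
        if li < m then pvRowMap (F li) (gd.getD li []) else gd.getD li [])).length = gd.length := by
      simp
    have hget : ((List.range gd.length).map (fun li =>
        if li < m then pvRowMap (F li) (gd.getD li []) else gd.getD li [])).getD m [] = gd.getD m [] := by
      rw [PySem.List.getD_map_range _ _ _ _ hmlt, if_neg (by omega)]
    rw [pvInnerFold _ m _ _ (by rw [hlen]; omega) (by rw [hget])]
    rw [hget]
    have hfull : pvMapBelow (gd.getD m []).length (F m) (gd.getD m []) = pvRowMap (F m) (gd.getD m []) := by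
      unfold pvMapBelow pvRowMap
      apply List.map_congr_left
      intro i hi
      rw [List.mem_range] at hi
      rw [if_pos hi]
    rw [hfull, pvMapRangeSet]
    apply List.map_congr_left
    intro i hi
    rw [List.mem_range] at hi
    by_cases him : i = m
    · subst him
      rw [if_pos rfl, if_pos (by omega)]
    · rw [if_neg him]
      by_cases h2 : i < m
      · rw [if_pos h2, if_pos (by omega)]
      · rw [if_neg h2, if_neg (by omega)]

lemma pvAlt_eq (cet gd : List (List (List Int))) :
    constraint_expert_local_exchange_alt cet gd
      = (List.range gd.length).map (fun li =>
          (List.range (gd.getD li []).length).map (fun ci =>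
            pvBCard ((cet.getD li []).getD ci []) ((gd.getD li []).getD ci []))) := by
  unfold constraint_expert_local_exchange_alt
  apply List.ext_getElem
  · simp [PySem.List.length_enumerate]
  · intro li h1 h2
    rw [List.getElem_map, List.getElem_map, List.getElem_range]
    have hlig : li < gd.length := by
      simpa [PySem.List.length_enumerate] using h1
    rw [PySem.List.getElem_enumerate]
    dsimp only
    apply List.ext_getElem
    · simp [PySem.List.length_enumerate, List.getD, List.getElem?_eq_getElem hlig]
    · intro ci hc1 hc2
      rw [List.getElem_map, List.getElem_map, List.getElem_range]
      have hcig : ci < gd[li].length := by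
        simpa [PySem.List.length_enumerate] using hc1
      rw [PySem.List.getElem_enumerate]
      simp only [Int.toNat_natCast, zero_add]
      rw [List.getD_eq_getElem gd _ hlig]
      rw [List.getD_eq_getElem gd[li] _ hcig]

lemma pvMain (cet gd : List (List (List Int)))
    (hpre : ∀ li < gd.length, ∀ ci < (gd.getD li []).length,
      li < cet.length ∧ ci < (cet.getD li []).length ∧
      ((gd.getD li []).getD ci []).length ≤ ((cet.getD li []).getD ci []).length ∧
      ¬((-1 : Int) ∈ (gd.getD li []).getD ci [] ∧
        (-1 : Int) ∈ ((cet.getD li []).getD ci []).take ((gd.getD li []).getD ci []).length)) :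
    constraint_expert_local_exchange cet gd = constraint_expert_local_exchange_alt cet gd := by
  unfold constraint_expert_local_exchange
  rw [pvOuterFold (fun li ci x => pvACard ((cet.getD li []).getD ci []) x) gd.length gd le_rfl]
  rw [pvAlt_eq]
  apply List.map_congr_left
  intro li hli
  rw [List.mem_range] at hli
  rw [if_pos hli]
  unfold pvRowMap
  apply List.map_congr_left
  intro ci hci
  rw [List.mem_range] at hci
  obtain ⟨_, _, hlen, hcol⟩ := hpre li hli ci hci
  exact pvCard_eq _ _ hlen hcol

-- ===== VERDICT (by name: the statement is the Claim_ definition above) =====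
theorem constraint_expert_local_exchange_spec : Claim_equal_constraint_expert_local_exchange := by
  intro cet gd _ hpre
  unfold Spec_constraint_expert_local_exchange
  unfold Pre_constraint_expert_local_exchange at hpre
  exact pvMain cet gd hpre
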